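-- pv_equiv track=rewrite | github.com/666-33/propaganda-radar | radar/extract.py | lead_paragraphs
-- ===== SOURCE A (Python) =====
-- from typing import Optional, List
--
-- def lead_paragraphs(text: str, n: int = 3) -> str:
--     if not text:
--         return ""
--     chunks: List[str] = []
--     buf: List[str] = []
--     for line in text.splitlines():
--         line = line.strip()
--         if not line:
--             if buf:
--                 chunks.append(" ".join(buf).strip())
--                 buf = []
--             continue
--         buf.append(line)
--     if buf:
--         chunks.append(" ".join(buf).strip())
--     chunks = [c for c in chunks if c]
--     return "\n\n".join(chunks[:n])
-- ===== SOURCE B (Python) =====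
-- def lead_paragraphs(text: str, n: int = 3) -> str:
--     if not text:
--         return ""
--     lines = [l.strip() for l in text.splitlines()]
--     cuts = [i for i, l in enumerate(lines) if not l]
--     starts = [0] + [c + 1 for c in cuts]
--     ends = cuts + [len(lines)]
--     paras = [" ".join(lines[a:b]) for a, b in zip(starts, ends) if a < b]
--     return "\n\n".join(paras[:n])
-- ===== Notes on version B (the rewrite author's own statement) =====
-- stated objective: alternative
-- what changed: Replaces A's incremental buffer-and-flush scan with a boundary-index algorithm: strip all lines, collect the indices of the blank lines, pair consecutive boundaries with zip, and cut each paragraph out of the line list by slicing between boundaries; the running buffer, the per-chunk re-strip and the empty-chunk filter disappear.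
import Mathlib
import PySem

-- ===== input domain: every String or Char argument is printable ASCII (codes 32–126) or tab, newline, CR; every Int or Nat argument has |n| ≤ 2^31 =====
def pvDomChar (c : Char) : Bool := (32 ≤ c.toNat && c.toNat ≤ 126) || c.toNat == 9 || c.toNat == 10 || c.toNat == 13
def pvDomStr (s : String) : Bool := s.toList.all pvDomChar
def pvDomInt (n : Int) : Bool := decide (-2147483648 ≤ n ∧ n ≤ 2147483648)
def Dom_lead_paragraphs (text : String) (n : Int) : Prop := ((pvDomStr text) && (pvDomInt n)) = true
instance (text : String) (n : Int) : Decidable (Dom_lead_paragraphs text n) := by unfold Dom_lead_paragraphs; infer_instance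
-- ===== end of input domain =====

-- B replaces A's incremental buffer-flush scan by a boundary-index algorithm: collect the
-- indices of the blank lines, pair consecutive boundaries, and cut each paragraph out by
-- slicing between them (objective: alternative).

-- ===== PORT A =====
-- the loop body: 'line = line.strip(); if not line: (if buf: flush); continue / else buf.append(line)'
def leadStep (st : List String × List String) (line : String) : List String × List String :=
  let l := PySem.Str.strip line
  if l = "" then
    if st.2 = [] then st
    else (st.1 ++ [PySem.Str.strip (PySem.Str.join " " st.2)], [])
  else (st.1, st.2 ++ [l])

-- the post-loop 'if buf: chunks.append(" ".join(buf).strip())'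
def leadFlush (st : List String × List String) : List String :=
  if st.2 = [] then st.1 else st.1 ++ [PySem.Str.strip (PySem.Str.join " " st.2)]

def lead_paragraphs (text : String) (n : Int) : String :=
  if text = "" then ""
  else
    PySem.Str.join "\n\n" (PySem.List.slice
      ((leadFlush ((PySem.Str.splitlines text).foldl leadStep ([], []))).filter (fun c => c != ""))
      none (some n))

-- ===== PORT B =====
def lead_paragraphs_alt (text : String) (n : Int) : String :=
  if text = "" then ""
  else
    let lines := (PySem.Str.splitlines text).map PySem.Str.strip
    -- cuts = [i for i, l in enumerate(lines) if not l]
    let cuts := (PySem.List.enumerate lines).filterMap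
      (fun il => if il.2 = "" then some il.1 else none)
    -- starts = [0] + [c + 1 for c in cuts];  ends = cuts + [len(lines)]
    let starts := 0 :: cuts.map (· + 1)
    let ends := cuts ++ [(lines.length : Int)]
    -- paras = [" ".join(lines[a:b]) for a, b in zip(starts, ends) if a < b]
    let paras := ((starts.zip ends).filter (fun p => decide (p.1 < p.2))).map
      (fun p => PySem.Str.join " " (PySem.List.slice lines (some p.1) (some p.2)))
    PySem.Str.join "\n\n" (PySem.List.slice paras none (some n))

-- ===== PRECONDITION & SPEC =====
def Spec_lead_paragraphs (text : String) (n : Int) (out : String) : Prop := out = lead_paragraphs_alt text n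
instance (text : String) (n : Int) (out : String) : Decidable (Spec_lead_paragraphs text n out) := by unfold Spec_lead_paragraphs; infer_instance

-- ===== CLAIM (what is proved, stated in full; the proofs are below) =====
def Claim_equal_lead_paragraphs : Prop := ∀ (text : String) (n : Int), Dom_lead_paragraphs text n → Spec_lead_paragraphs text n (lead_paragraphs text n)

-- ===== LEMMAS AND PROOFS =====

-- A's loop body on an already-stripped line
def pvStep (st : List String × List String) (l : String) : List String × List String :=
  if l = "" then
    if st.2 = [] then st
    else (st.1 ++ [PySem.Str.strip (PySem.Str.join " " st.2)], [])
  else (st.1, st.2 ++ [l])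

lemma pv_leadStep_eq : leadStep = fun st line => pvStep st (PySem.Str.strip line) := rfl

-- proof-side description of the paragraphs: maximal runs of non-blank lines
def altGroups : List String → List (List String)
  | [] => []
  | l :: ls =>
    if l = "" then altGroups ls
    else (l :: ls.takeWhile (fun s => s != "")) :: altGroups (ls.dropWhile (fun s => s != ""))
termination_by xs => xs.length
decreasing_by
  · simp
  · exact Nat.lt_succ_of_le (List.length_dropWhile_le _ _)

-- B's grouping, generalized with a pending (non-blank) buffer
def pvGroupsFrom (buf xs : List String) : List (List String) :=
  if buf = [] then altGroups xs
  else (buf ++ xs.takeWhile (fun s => s != "")) :: altGroups (xs.dropWhile (fun s => s != ""))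

-- ----- character-level facts about strip/join -----

lemma pv_lstrip_eq {cs : List Char} (h : PySem.Chars.strip cs = cs) : PySem.Chars.lstrip cs = cs := by
  have hsuf : PySem.Chars.lstrip cs <:+ cs := List.dropWhile_suffix _
  apply hsuf.eq_of_length
  have h1 : (PySem.Chars.rstrip (PySem.Chars.lstrip cs)).length ≤ (PySem.Chars.lstrip cs).length := by
    simp [PySem.Chars.rstrip]
    exact le_trans (List.length_dropWhile_le _ _) (by simp)
  have h2 : (PySem.Chars.lstrip cs).length ≤ cs.length := List.length_dropWhile_le _ _
  have h3 : (PySem.Chars.rstrip (PySem.Chars.lstrip cs)).length = cs.length := by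
    rw [show PySem.Chars.rstrip (PySem.Chars.lstrip cs) = cs from h]
  omega

lemma pv_rstrip_eq {cs : List Char} (h : PySem.Chars.strip cs = cs) : PySem.Chars.rstrip cs = cs := by
  have := pv_lstrip_eq h
  calc PySem.Chars.rstrip cs = PySem.Chars.rstrip (PySem.Chars.lstrip cs) := by rw [this]
    _ = cs := h

lemma pv_head_not_space {c : Char} {l : List Char} (h : PySem.Chars.lstrip (c :: l) = c :: l) :
    PySem.Chars.isspace c = false := by
  by_contra hc
  have hc' : PySem.Chars.isspace c = true := by
    cases hx : PySem.Chars.isspace c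
    · exact absurd hx hc
    · rfl
  have : PySem.Chars.lstrip (c :: l) = List.dropWhile PySem.Chars.isspace l := by
    simp [PySem.Chars.lstrip, hc']
  have hlen : (List.dropWhile PySem.Chars.isspace l).length ≤ l.length := List.length_dropWhile_le _ _
  rw [this] at h
  have : (c :: l).length ≤ l.length := by rw [← h]; exact hlen
  simp at this

lemma pv_lstrip_append {a t : List Char} (ha : a ≠ []) (h : PySem.Chars.lstrip a = a) :
    PySem.Chars.lstrip (a ++ t) = a ++ t := by
  simp only [PySem.Chars.lstrip] at *
  rw [List.dropWhile_append, h]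
  simp [ha]

lemma pv_rstrip_append {a t : List Char} (ha : a ≠ []) (h : PySem.Chars.rstrip a = a) :
    PySem.Chars.rstrip (t ++ a) = t ++ a := by
  have hrev : List.dropWhile PySem.Chars.isspace a.reverse = a.reverse := by
    have := congrArg List.reverse h
    simpa [PySem.Chars.rstrip] using this
  simp only [PySem.Chars.rstrip, List.reverse_append]
  rw [List.dropWhile_append, hrev]
  simp [ha]

lemma pv_strip_strip (cs : List Char) : PySem.Chars.strip (PySem.Chars.strip cs) = PySem.Chars.strip cs := by
  set w := PySem.Chars.lstrip cs with hw
  have hlw : PySem.Chars.lstrip w = w := by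
    simp [hw, PySem.Chars.lstrip, List.dropWhile_idempotent]
  set y := PySem.Chars.rstrip w with hy
  have hry : PySem.Chars.rstrip y = y := by
    simp [hy, PySem.Chars.rstrip, List.dropWhile_idempotent]
  have hyw : y <+: w := by
    have : y.reverse <:+ w.reverse := by
      simp only [hy, PySem.Chars.rstrip, List.reverse_reverse]
      exact List.dropWhile_suffix _
    rwa [List.reverse_suffix] at this
  have hly : PySem.Chars.lstrip y = y := by
    cases hyc : y with
    | nil => simp [PySem.Chars.lstrip]
    | cons c y' =>
      obtain ⟨tl, htl⟩ := hyw
      rw [hyc] at htl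
      have hc : PySem.Chars.isspace c = false := by
        apply pv_head_not_space (l := y'.append tl)
        rw [show (c :: y'.append tl) = w by simpa using htl] at *
        simpa using hlw
      simp [PySem.Chars.lstrip, hc]
  show PySem.Chars.rstrip (PySem.Chars.lstrip y) = y
  rw [hly, hry]

lemma pv_strip_strip_str (s : String) : PySem.Str.strip (PySem.Str.strip s) = PySem.Str.strip s := by
  apply String.toList_inj.mp
  simp [PySem.Str.toList_strip, pv_strip_strip]

lemma pv_join_ne_nil {sep p : List Char} (parts : List (List Char)) (hp : p ≠ []) :
    PySem.Chars.join sep (p :: parts) ≠ [] := by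
  cases parts with
  | nil => simpa [PySem.Chars.join_singleton] using hp
  | cons q rest => simp [PySem.Chars.join_cons_cons, hp]

lemma pv_join_lstrip {sep : List Char} {parts : List (List Char)}
    (h : ∀ p ∈ parts, p ≠ [] ∧ PySem.Chars.lstrip p = p) (hne : parts ≠ []) :
    PySem.Chars.lstrip (PySem.Chars.join sep parts) = PySem.Chars.join sep parts := by
  cases parts with
  | nil => exact absurd rfl hne
  | cons b rest =>
    obtain ⟨hb, hlb⟩ := h b (by simp)
    cases rest with
    | nil => simpa [PySem.Chars.join_singleton] using hlb
    | cons q rs =>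
      rw [PySem.Chars.join_cons_cons, List.append_assoc]
      exact pv_lstrip_append hb hlb

lemma pv_join_rstrip {sep : List Char} : ∀ {parts : List (List Char)},
    (∀ p ∈ parts, p ≠ [] ∧ PySem.Chars.rstrip p = p) → parts ≠ [] →
    PySem.Chars.rstrip (PySem.Chars.join sep parts) = PySem.Chars.join sep parts
  | [], _, hne => absurd rfl hne
  | [b], h, _ => by simpa [PySem.Chars.join_singleton] using (h b (by simp)).2
  | b :: q :: rs, h, _ => by
    have ih := pv_join_rstrip (sep := sep) (parts := q :: rs)
      (fun p hp => h p (List.mem_cons_of_mem _ hp)) (by simp)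
    have hq : q ≠ [] := (h q (by simp)).1
    rw [PySem.Chars.join_cons_cons]
    exact pv_rstrip_append (pv_join_ne_nil rs hq) ih

lemma pv_strip_join (buf : List String) (hne : buf ≠ [])
    (h : ∀ x ∈ buf, x ≠ "" ∧ PySem.Str.strip x = x) :
    PySem.Str.strip (PySem.Str.join " " buf) = PySem.Str.join " " buf := by
  apply String.toList_inj.mp
  rw [PySem.Str.toList_strip, PySem.Str.toList_join]
  have hprop : ∀ p ∈ buf.map String.toList, p ≠ [] ∧ PySem.Chars.strip p = p := by
    intro p hp
    obtain ⟨x, hx, rfl⟩ := List.mem_map.mp hp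
    obtain ⟨hx1, hx2⟩ := h x hx
    refine ⟨by simpa [String.toList_eq_nil_iff] using hx1, ?_⟩
    have := congrArg String.toList hx2
    simpa [PySem.Str.toList_strip] using this
  have hne' : buf.map String.toList ≠ [] := by simpa using hne
  show PySem.Chars.rstrip (PySem.Chars.lstrip _) = _
  rw [pv_join_lstrip (fun p hp => ⟨(hprop p hp).1, pv_lstrip_eq (hprop p hp).2⟩) hne',
      pv_join_rstrip (fun p hp => ⟨(hprop p hp).1, pv_rstrip_eq (hprop p hp).2⟩) hne']

lemma pv_join_ne_empty (b : String) (rest : List String) (hb : b ≠ "") :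
    PySem.Str.join " " (b :: rest) ≠ "" := by
  intro hcon
  have := congrArg String.toList hcon
  rw [PySem.Str.toList_join] at this
  have h2 : PySem.Chars.join " ".toList (b.toList :: rest.map String.toList) = [] := by
    simpa using this
  exact pv_join_ne_nil (p := b.toList) (rest.map String.toList)
    (by simpa [String.toList_eq_nil_iff] using hb) h2

-- ----- the A-side loop invariant -----

lemma pv_core : ∀ (xs cs buf : List String),
    (∀ x ∈ buf, x ≠ "" ∧ PySem.Str.strip x = x) →
    (∀ x ∈ xs, PySem.Str.strip x = x) →
    leadFlush (xs.foldl pvStep (cs, buf)) =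
      cs ++ (pvGroupsFrom buf xs).map (fun r => PySem.Str.join " " r)
  | [], cs, buf, hbuf, _ => by
    by_cases hb : buf = []
    · simp [hb, leadFlush, pvGroupsFrom, altGroups]
    · simp only [List.foldl_nil, leadFlush, pvGroupsFrom, if_neg hb]
      simp [pv_strip_join buf hb hbuf, altGroups]
  | x :: xs, cs, buf, hbuf, hxs => by
    rw [List.foldl_cons]
    by_cases hx : x = ""
    · by_cases hb : buf = []
      · have hstep : pvStep (cs, buf) x = (cs, buf) := by simp [pvStep, hx, hb]
        rw [hstep, pv_core xs cs buf hbuf (fun y hy => hxs y (by simp [hy]))]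
        simp [pvGroupsFrom, hb, hx, altGroups]
      · have hstep : pvStep (cs, buf) x =
            (cs ++ [PySem.Str.strip (PySem.Str.join " " buf)], []) := by
          simp [pvStep, hx, hb]
        rw [hstep, pv_core xs _ [] (by simp) (fun y hy => hxs y (by simp [hy]))]
        simp only [pvGroupsFrom, if_neg hb]
        rw [pv_strip_join buf hb hbuf]
        simp [hx, altGroups]
    · have hstep : pvStep (cs, buf) x = (cs, buf ++ [x]) := by simp [pvStep, hx]
      have hbuf' : ∀ y ∈ buf ++ [x], y ≠ "" ∧ PySem.Str.strip y = y := by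
        intro y hy
        rcases List.mem_append.mp hy with h1 | h1
        · exact hbuf y h1
        · rw [show y = x from by simpa using h1]
          exact ⟨hx, hxs x (by simp)⟩
      rw [hstep, pv_core xs cs (buf ++ [x]) hbuf' (fun y hy => hxs y (by simp [hy]))]
      congr 1
      by_cases hb : buf = []
      · subst hb
        simp [pvGroupsFrom, altGroups, hx]
      · simp [pvGroupsFrom, hb, hx]
  termination_by xs => xs.length

-- every group is a nonempty run of non-blank lines from xs
lemma pv_mem_altGroups : ∀ (xs : List String), ∀ g ∈ altGroups xs,
    g ≠ [] ∧ ∀ s ∈ g, s ≠ ""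
  | [], g, hg => by simp [altGroups] at hg
  | l :: ls, g, hg => by
    rw [altGroups] at hg
    by_cases hl : l = ""
    · rw [if_pos hl] at hg
      exact pv_mem_altGroups ls g hg
    · rw [if_neg hl] at hg
      rcases List.mem_cons.mp hg with h1 | h1
      · subst h1
        refine ⟨by simp, ?_⟩
        intro s hs
        rcases List.mem_cons.mp hs with h2 | h2
        · subst h2; exact hl
        · have := List.mem_takeWhile_imp h2
          simpa using this
      · exact pv_mem_altGroups (ls.dropWhile (fun s => s != "")) g
          (by simpa using h1)
  termination_by xs => xs.length
  decreasing_by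
    · simp
    · exact Nat.lt_succ_of_le (List.length_dropWhile_le _ _)

lemma pv_filter_id (xs : List String) :
    ((altGroups xs).map (fun r => PySem.Str.join " " r)).filter (fun c => c != "") =
      (altGroups xs).map (fun r => PySem.Str.join " " r) := by
  apply List.filter_eq_self.mpr
  intro a ha
  obtain ⟨g, hg, rfl⟩ := List.mem_map.mp ha
  obtain ⟨hgne, hgmem⟩ := pv_mem_altGroups xs g hg
  cases g with
  | nil => exact absurd rfl hgne
  | cons b rest =>
    simpa using pv_join_ne_empty b rest (hgmem b (by simp))

-- ----- the B-side: boundary indices vs runs -----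

-- Nat-level blank-line indices
def natCuts : List String → List Nat
  | [] => []
  | x :: t => if x = "" then 0 :: (natCuts t).map (· + 1) else (natCuts t).map (· + 1)

-- the Nat-level paragraph list B computes
def pvParas (xs : List String) : List String :=
  (((0 :: (natCuts xs).map (· + 1)).zip ((natCuts xs) ++ [xs.length])).filter
      (fun p => decide (p.1 < p.2))).map
    (fun p => PySem.Str.join " " ((xs.drop p.1).take (p.2 - p.1)))

lemma pv_cuts_enum (xs : List String) : ∀ (s : Int),
    (PySem.List.enumerate xs s).filterMap (fun il => if il.2 = "" then some il.1 else none) =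
      (natCuts xs).map (fun k => s + (k : Nat)) := by
  induction xs with
  | nil => intro s; simp [natCuts]
  | cons x t ih =>
    intro s
    rw [PySem.List.enumerate_cons]
    by_cases hx : x = ""
    · rw [show natCuts (x :: t) = 0 :: (natCuts t).map (· + 1) from by
        rw [natCuts, if_pos hx]]
      simp only [List.filterMap_cons, hx, reduceIte, ih (s + 1), List.map_cons, List.map_map,
        Nat.cast_zero, add_zero]
      refine congrArg (s :: ·) (List.map_congr_left fun k _ => ?_)
      simp only [Function.comp_apply]
      push_cast; ring
    · rw [show natCuts (x :: t) = (natCuts t).map (· + 1) from by rw [natCuts, if_neg hx]]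
      simp only [List.filterMap_cons, if_neg hx, ih (s + 1), List.map_map]
      refine List.map_congr_left fun k _ => ?_
      simp only [Function.comp_apply]
      push_cast; ring

lemma pv_map_add_add (l : List Nat) (a b : Nat) :
    (l.map (· + a)).map (· + b) = l.map (· + (a + b)) := by
  rw [List.map_map]
  apply List.map_congr_left
  intro k _
  simp only [Function.comp_apply]
  omega

lemma pv_nonblank_prefix_cuts : ∀ (w r : List String), (∀ x ∈ w, x ≠ "") →
    natCuts (w ++ r) = (natCuts r).map (· + w.length)
  | [], r, _ => by simp [List.map_id']
  | x :: w, r, h => by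
    have hx : x ≠ "" := h x (by simp)
    rw [List.cons_append, natCuts, if_neg hx,
      pv_nonblank_prefix_cuts w r (fun y hy => h y (by simp [hy])), List.map_map]
    apply List.map_congr_left
    intro k _
    simp only [Function.comp_apply, List.length_cons]
    omega

-- shifting all pairs by the length of a prefix leaves the paragraphs unchanged
lemma pv_shift_paras (w ys : List String) (prs : List (Nat × Nat)) :
    ((prs.map (fun p => (p.1 + w.length, p.2 + w.length))).filter (fun p => decide (p.1 < p.2))).map
        (fun p => PySem.Str.join " " (((w ++ ys).drop p.1).take (p.2 - p.1))) =
      (prs.filter (fun p => decide (p.1 < p.2))).map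
        (fun p => PySem.Str.join " " ((ys.drop p.1).take (p.2 - p.1))) := by
  rw [List.filter_map, List.map_map]
  have hfil : prs.filter ((fun p : Nat × Nat => decide (p.1 < p.2)) ∘
      fun p => (p.1 + w.length, p.2 + w.length)) = prs.filter (fun p => decide (p.1 < p.2)) := by
    apply List.filter_congr
    intro p _
    simp
  rw [hfil]
  apply List.map_congr_left
  intro p _
  simp only [Function.comp_apply]
  congr 1
  have h1 : p.2 + w.length - (p.1 + w.length) = p.2 - p.1 := by omega
  have h2 : List.drop (w.length + p.1) w = [] := List.drop_eq_nil_of_le (by omega)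
  rw [h1, Nat.add_comm p.1, List.drop_append, h2, List.nil_append, Nat.add_sub_cancel_left]

lemma pv_paras_all_nonblank (w : List String) (hw : w ≠ []) (hwnb : ∀ x ∈ w, x ≠ "") :
    pvParas w = [PySem.Str.join " " w] := by
  have hc : natCuts w = [] := by
    have := pv_nonblank_prefix_cuts w [] hwnb
    simpa [natCuts] using this
  have hlen : 0 < w.length := List.length_pos_iff.mpr hw
  simp [pvParas, hc, hlen, List.take_length]

lemma pv_paras_blank_cons (t : List String) : pvParas ("" :: t) = pvParas t := by
  have hnc : natCuts ("" :: t) = 0 :: (natCuts t).map (· + 1) := by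
    rw [natCuts, if_pos rfl]
  have key := pv_shift_paras [""] t ((0 :: (natCuts t).map (· + 1)).zip ((natCuts t) ++ [t.length]))
  simp only [List.length_cons, List.length_nil, Nat.zero_add] at key
  unfold pvParas
  rw [hnc]
  simp only [List.map_cons, Nat.zero_add, List.cons_append, List.length_cons,
    List.zip_cons_cons, List.filter_cons]
  norm_num
  rw [show (fun p : Nat × Nat => (p.1 + 1, p.2 + 1)) = Prod.map (· + 1) (· + 1) from rfl,
    ← List.zip_map] at key
  simp only [List.map_cons, Nat.zero_add, pv_map_add_add] at key
  norm_num at key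
  exact key

lemma pv_paras_split (w r' : List String) (hw : w ≠ []) (hwnb : ∀ x ∈ w, x ≠ "") :
    pvParas (w ++ "" :: r') = PySem.Str.join " " w :: pvParas r' := by
  have hm : 0 < w.length := List.length_pos_iff.mpr hw
  have hnc : natCuts (w ++ "" :: r') =
      w.length :: ((natCuts r').map (· + 1)).map (· + w.length) := by
    rw [pv_nonblank_prefix_cuts w _ hwnb, natCuts, if_pos rfl]
    simp
  have htail : (((w.length + 1) :: ((((natCuts r').map (· + 1)).map (· + w.length)).map (· + 1))).zip
        ((((natCuts r').map (· + 1)).map (· + w.length)) ++ [(w ++ "" :: r').length])) =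
      ((0 :: (natCuts r').map (· + 1)).zip ((natCuts r') ++ [r'.length])).map
        (fun p => (p.1 + (w.length + 1), p.2 + (w.length + 1))) := by
    rw [show (fun p : Nat × Nat => (p.1 + (w.length + 1), p.2 + (w.length + 1))) =
        Prod.map (· + (w.length + 1)) (· + (w.length + 1)) from rfl, ← List.zip_map]
    congr 1
    · simp only [List.map_cons, Nat.zero_add, pv_map_add_add]
      simp [Nat.add_comm, Nat.add_left_comm]
    · simp only [List.map_append, List.map_map, pv_map_add_add, List.length_append,
        List.length_cons, List.map_cons]
      congr 1
      · apply List.map_congr_left; intro k _; simp only [Function.comp_apply]; omega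
      · simp only [List.map_nil]
        congr 1
        omega
  have hshift := pv_shift_paras (w ++ [""]) r'
    ((0 :: (natCuts r').map (· + 1)).zip ((natCuts r') ++ [r'.length]))
  simp only [List.length_append, List.length_cons, List.length_nil, Nat.zero_add,
    List.append_assoc, List.cons_append, List.nil_append] at hshift
  unfold pvParas
  rw [hnc]
  simp only [List.map_cons, List.cons_append, List.zip_cons_cons, List.filter_cons]
  rw [show decide (0 < w.length) = true by simp [hm]]
  simp only [if_true, List.map_cons, Nat.sub_zero, List.drop_zero]
  congr 1
  · rw [List.take_left]
  · rw [htail]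
    exact hshift

lemma pv_paras_eq_groups : ∀ (xs : List String),
    pvParas xs = (altGroups xs).map (fun r => PySem.Str.join " " r)
  | [] => by simp [pvParas, natCuts, altGroups]
  | x :: t => by
    by_cases hx : x = ""
    · subst hx
      rw [pv_paras_blank_cons, altGroups, if_pos rfl]
      exact pv_paras_eq_groups t
    · rw [altGroups, if_neg hx]
      have hsplit : (x :: t.takeWhile (fun s => s != "")) ++ t.dropWhile (fun s => s != "") =
          x :: t := by
        rw [List.cons_append, List.takeWhile_append_dropWhile]
      have hwnb : ∀ y ∈ x :: t.takeWhile (fun s => s != ""), y ≠ "" := by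
        intro y hy
        rcases List.mem_cons.mp hy with h | h
        · subst h; exact hx
        · have := List.mem_takeWhile_imp h
          simpa using this
      cases hr : t.dropWhile (fun s => s != "") with
      | nil =>
        rw [hr, List.append_nil] at hsplit
        rw [← hsplit, pv_paras_all_nonblank _ (by simp) hwnb]
        simp [altGroups]
      | cons y r' =>
        have hy : y = "" := by
          have h0 : t.dropWhile (fun s => s != "") ≠ [] := by simp [hr]
          have h1 := List.head_dropWhile_not (fun s => s != "") h0
          have h2 : (t.dropWhile (fun s => s != "")).head h0 = y := by simp [hr]
          rw [h2] at h1
          simpa using h1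
        subst hy
        rw [hr] at hsplit
        rw [← hsplit, pv_paras_split _ r' (by simp) hwnb]
        rw [show altGroups ("" :: r') = altGroups r' from by rw [altGroups, if_pos rfl]]
        rw [List.map_cons]
        rw [pv_paras_eq_groups r']
termination_by xs => xs.length
decreasing_by
  · simp
  · have hlen := List.length_dropWhile_le (fun s => s != "") t
    rw [hr] at hlen
    simp only [List.length_cons] at hlen ⊢
    omega

lemma pv_alt_paras (lines : List String) :
    (((0 :: ((PySem.List.enumerate lines).filterMap
          (fun il => if il.2 = "" then some il.1 else none)).map (· + 1)).zip
        (((PySem.List.enumerate lines).filterMap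
          (fun il => if il.2 = "" then some il.1 else none)) ++ [(lines.length : Int)])).filter
          (fun p => decide (p.1 < p.2))).map
        (fun p => PySem.Str.join " " (PySem.List.slice lines (some p.1) (some p.2))) =
      pvParas lines := by
  have hc : (PySem.List.enumerate lines).filterMap
      (fun il => if il.2 = "" then some il.1 else none) =
      (natCuts lines).map ((Nat.cast : Nat → Int) : Nat → Int) := by
    rw [show PySem.List.enumerate lines = PySem.List.enumerate lines 0 from rfl, pv_cuts_enum]
    apply List.map_congr_left
    intro k _
    simp
  rw [hc]
  have h1 : (0 : Int) :: ((natCuts lines).map ((Nat.cast : Nat → Int) : Nat → Int)).map (· + 1) =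
      (0 :: (natCuts lines).map (· + 1)).map ((Nat.cast : Nat → Int)) := by
    simp only [List.map_cons, List.map_map, Nat.cast_zero]
    refine congrArg ((0 : Int) :: ·) (List.map_congr_left fun k _ => ?_)
    simp only [Function.comp_apply]
    push_cast; ring
  have h2 : ((natCuts lines).map ((Nat.cast : Nat → Int) : Nat → Int)) ++ [(lines.length : Int)] =
      ((natCuts lines) ++ [lines.length]).map ((Nat.cast : Nat → Int)) := by
    simp
  rw [h1, h2, List.zip_map, List.filter_map, List.map_map]
  have hfil : ((0 :: (natCuts lines).map (· + 1)).zip ((natCuts lines) ++ [lines.length])).filter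
      ((fun p : Int × Int => decide (p.1 < p.2)) ∘
        Prod.map ((Nat.cast : Nat → Int)) ((Nat.cast : Nat → Int))) =
      ((0 :: (natCuts lines).map (· + 1)).zip ((natCuts lines) ++ [lines.length])).filter
        (fun p => decide (p.1 < p.2)) := by
    apply List.filter_congr
    intro p _
    simp
  rw [hfil]
  apply List.map_congr_left
  intro p _
  simp only [Function.comp_apply, Prod.map_fst, Prod.map_snd]
  rw [PySem.List.slice_natCast]

-- ===== VERDICT (by name: the statement is the Claim_ definition above) =====
theorem lead_paragraphs_spec : Claim_equal_lead_paragraphs := by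
  intro text n _
  unfold Spec_lead_paragraphs lead_paragraphs lead_paragraphs_alt
  by_cases ht : text = ""
  · simp [ht]
  · rw [if_neg ht, if_neg ht]
    refine congrArg (fun l => PySem.Str.join "\n\n" (PySem.List.slice l none (some n))) ?_
    have hfold : (PySem.Str.splitlines text).foldl leadStep ([], []) =
        ((PySem.Str.splitlines text).map PySem.Str.strip).foldl pvStep ([], []) := by
      rw [pv_leadStep_eq, ← List.foldl_map]
    have hstr : ∀ x ∈ (PySem.Str.splitlines text).map PySem.Str.strip,
        PySem.Str.strip x = x := by
      intro x hx
      obtain ⟨y, _, rfl⟩ := List.mem_map.mp hx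
      exact pv_strip_strip_str y
    rw [hfold, pv_core _ [] [] (by simp) hstr]
    simp only [pvGroupsFrom, List.nil_append, reduceIte]
    rw [pv_filter_id, ← pv_paras_eq_groups]
    exact (pv_alt_paras ((PySem.Str.splitlines text).map PySem.Str.strip)).symm
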